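-- pv_equiv track=rewrite | github.com/Meet00732/CS-Helper | lambda/text_cleaning_lambda.py | truncate_long_sections
-- ===== SOURCE A (Python) =====
-- def truncate_long_sections(text, max_length=5000):
--     sections = text.split("\n\n")  # Split by paragraphs
--     truncated_text = []
--     total_length = 0
--
--     for section in sections:
--         section_length = len(section)
--         if total_length + section_length <= max_length:
--             truncated_text.append(section)
--             total_length += section_length
--         else:
--             break
--
--     return "\n\n".join(truncated_text)
-- ===== SOURCE B (Python) =====
-- def truncate_long_sections(text, max_length=5000):
--     # Prefix-sum table of section lengths, then pick the longest prefix whose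
--     # cumulative length fits; cumulative sums are monotone, so counting the
--     # ones <= max_length gives the break point.
--     sections = text.split("\n\n")
--     prefix = []
--     total = 0
--     for s in sections:
--         total += len(s)
--         prefix.append(total)
--     k = sum(1 for p in prefix if p <= max_length)
--     return "\n\n".join(sections[:k])
-- ===== Notes on version B (the rewrite author's own statement) =====
-- stated objective: alternative
-- what changed: B precomputes a prefix-sum table of section lengths and selects the cut index by counting cumulative sums <= max_length (valid by monotonicity), instead of A's accumulate-and-break loop that builds the output list element by element.
import Mathlib
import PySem

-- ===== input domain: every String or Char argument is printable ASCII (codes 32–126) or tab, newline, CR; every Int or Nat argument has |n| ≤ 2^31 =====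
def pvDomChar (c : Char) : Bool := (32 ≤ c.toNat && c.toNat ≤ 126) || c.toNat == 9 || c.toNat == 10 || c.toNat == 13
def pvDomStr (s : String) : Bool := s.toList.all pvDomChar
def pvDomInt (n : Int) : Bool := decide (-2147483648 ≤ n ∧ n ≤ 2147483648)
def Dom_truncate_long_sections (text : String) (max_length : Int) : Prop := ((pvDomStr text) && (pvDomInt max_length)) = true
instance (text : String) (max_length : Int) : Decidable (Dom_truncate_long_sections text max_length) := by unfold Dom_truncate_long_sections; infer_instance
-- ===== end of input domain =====

-- B replaces A's accumulate-and-break loop by a prefix-sum table plus a count of sums ≤ max_length (alternative decomposition, same cost).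


-- ===== PORT A =====
-- the for-loop with break, state = (truncated_text accumulator, total_length)
def tlsLoopA (sections : List String) (acc : List String) (total : Int) (max_length : Int) : List String :=
  match sections with
  | [] => acc
  | s :: rest =>
    let l := PySem.Str.len s
    if total + l ≤ max_length then tlsLoopA rest (acc ++ [s]) (total + l) max_length
    else acc

def truncate_long_sections (text : String) (max_length : Int) : String :=
  let sections := (PySem.Str.split? text "\n\n").getD []   -- sep ≠ "", so split? is always `some`
  PySem.Str.join "\n\n" (tlsLoopA sections [] 0 max_length)

-- ===== PORT B =====
-- prefix-sum table built by a fold, state = (table, running total)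
def truncate_long_sections_alt (text : String) (max_length : Int) : String :=
  let sections := (PySem.Str.split? text "\n\n").getD []   -- sep ≠ "", so split? is always `some`
  let pfx := (sections.foldl
      (fun (st : List Int × Int) s =>
        let t := st.2 + PySem.Str.len s
        (st.1 ++ [t], t)) ([], 0)).1
  let k := pfx.countP (fun p => decide (p ≤ max_length))
  PySem.Str.join "\n\n" (sections.take k)

-- ===== PRECONDITION & SPEC =====
def Spec_truncate_long_sections (text : String) (max_length : Int) (out : String) : Prop := out = truncate_long_sections_alt text max_length
instance (text : String) (max_length : Int) (out : String) : Decidable (Spec_truncate_long_sections text max_length out) := by unfold Spec_truncate_long_sections; infer_instance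

-- ===== CLAIM (what is proved, stated in full; the proofs are below) =====
def Claim_equal_truncate_long_sections : Prop := ∀ (text : String) (max_length : Int), Dom_truncate_long_sections text max_length → Spec_truncate_long_sections text max_length (truncate_long_sections text max_length)

-- ===== LEMMAS AND PROOFS =====

-- the prefix-sum table as a pure recursion
def tlsPrefix (sections : List String) (total : Int) : List Int :=
  match sections with
  | [] => []
  | s :: rest => (total + PySem.Str.len s) :: tlsPrefix rest (total + PySem.Str.len s)

theorem tlsFold_eq (sections : List String) (acc : List Int) (total : Int) :
    sections.foldl
      (fun (st : List Int × Int) s =>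
        let t := st.2 + PySem.Str.len s
        (st.1 ++ [t], t)) (acc, total)
    = (acc ++ tlsPrefix sections total, total + (sections.map PySem.Str.len).sum) := by
  induction sections generalizing acc total with
  | nil => simp [tlsPrefix]
  | cons s rest ih =>
    simp only [List.foldl_cons, tlsPrefix, ih]
    simp only [Prod.mk.injEq, List.map_cons, List.sum_cons]
    exact ⟨by simp, by ring⟩

theorem tlsPrefix_ge (sections : List String) (total : Int) :
    ∀ p ∈ tlsPrefix sections total, total ≤ p := by
  induction sections generalizing total with
  | nil => simp [tlsPrefix]
  | cons s rest ih =>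
    intro p hp
    have hl : 0 ≤ PySem.Str.len s := by simp [PySem.Str.len_eq]
    simp only [tlsPrefix, List.mem_cons] at hp
    rcases hp with h | h
    · omega
    · have := ih (total + PySem.Str.len s) p h; omega

theorem tlsLoopA_eq (sections : List String) (acc : List String) (total m : Int) :
    tlsLoopA sections acc total m
    = acc ++ sections.take ((tlsPrefix sections total).countP (fun p => decide (p ≤ m))) := by
  induction sections generalizing acc total with
  | nil => simp [tlsLoopA, tlsPrefix]
  | cons s rest ih =>
    simp only [tlsLoopA, tlsPrefix]
    by_cases h : total + PySem.Str.len s ≤ m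
    · rw [if_pos h, ih]
      have : (List.countP (fun p => decide (p ≤ m)) ((total + PySem.Str.len s) :: tlsPrefix rest (total + PySem.Str.len s)))
          = (List.countP (fun p => decide (p ≤ m)) (tlsPrefix rest (total + PySem.Str.len s))) + 1 := by
        simp only [List.countP_cons]
        have hd : decide (total + PySem.Str.len s ≤ m) = true := by simpa using h
        simp only [hd, if_true]
      rw [this]
      simp [List.take_succ_cons]
    · rw [if_neg h]
      have hz : (List.countP (fun p => decide (p ≤ m)) ((total + PySem.Str.len s) :: tlsPrefix rest (total + PySem.Str.len s))) = 0 := by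
        rw [List.countP_eq_zero]
        intro p hp
        simp only [List.mem_cons] at hp
        rcases hp with rfl | hp
        · simpa using h
        · have := tlsPrefix_ge rest (total + PySem.Str.len s) p hp
          simp only [decide_eq_true_eq]
          omega
      rw [hz]
      simp

-- ===== VERDICT (by name: the statement is the Claim_ definition above) =====
theorem truncate_long_sections_spec : Claim_equal_truncate_long_sections := by
  intro text max_length _
  unfold Spec_truncate_long_sections truncate_long_sections truncate_long_sections_alt
  simp only [tlsFold_eq, List.nil_append, tlsLoopA_eq]
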